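-- pv_equiv track=rewrite | github.com/jyothiv-codes/LeetCode-solutions | 1731-even-odd-tree/even-odd-tree.py | check_odd_inc
-- ===== SOURCE A (Python) =====
-- def check_odd_inc(nums):
--     if len(nums)>1:
--         for i in range(1,len(nums)):
--             if nums[i]>nums[i-1] and (nums[i]%2!=0 and nums[i-1]%2!=0):
--                 pass
--             else:
--                 return False
--         return True
--     else:
--         if nums[0]%2!=0:
--             return True
--         return False
-- ===== SOURCE B (Python) =====
-- def check_odd_inc(nums):
--     def rec(lo, hi):
--         # segment nums[lo:hi] is all-odd and strictly increasing?
--         if hi - lo <= 1: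
--             return hi == lo or nums[lo] % 2 != 0
--         mid = (lo + hi) // 2
--         return rec(lo, mid) and rec(mid, hi) and nums[mid - 1] < nums[mid]
--     return rec(0, len(nums))
-- ===== Notes on version B (the rewrite author's own statement) =====
-- stated objective: alternative
-- what changed: Replaces A's linear index loop by a divide-and-conquer recursion: the index range is split at its midpoint, each half is checked recursively and the junction pair is compared, instead of scanning adjacent pairs left to right.
-- outside the precondition, e.g. on check_odd_inc([]): A raises IndexError, B returns True
import Mathlib
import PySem

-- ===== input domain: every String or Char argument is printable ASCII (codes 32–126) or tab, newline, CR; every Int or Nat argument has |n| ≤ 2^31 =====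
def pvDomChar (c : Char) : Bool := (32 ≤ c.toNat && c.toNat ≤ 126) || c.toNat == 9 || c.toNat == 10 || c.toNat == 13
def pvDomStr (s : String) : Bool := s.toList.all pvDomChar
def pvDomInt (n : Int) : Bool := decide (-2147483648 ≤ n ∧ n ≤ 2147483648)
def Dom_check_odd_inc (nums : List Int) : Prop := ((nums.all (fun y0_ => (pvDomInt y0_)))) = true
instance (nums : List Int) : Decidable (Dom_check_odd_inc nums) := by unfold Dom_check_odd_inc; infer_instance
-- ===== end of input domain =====

-- B replaces A's linear index loop by a divide-and-conquer recursion on index halves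
-- (objective: alternative); return-value equivalence on nonempty lists (A raises IndexError on []).

-- ===== PORT A =====
-- A's 'for i in range(1, len(nums))' loop, one step per index.
def checkLoopA (nums : List Int) : List Int → Bool
  | [] => true
  | i :: rest =>
    if PySem.List.pyGetD nums i 0 > PySem.List.pyGetD nums (i - 1) 0 ∧
        PySem.Int.mod (PySem.List.pyGetD nums i 0) 2 ≠ 0 ∧
        PySem.Int.mod (PySem.List.pyGetD nums (i - 1) 0) 2 ≠ 0 then
      checkLoopA nums rest
    else
      false

def check_odd_inc (nums : List Int) : Bool :=
  if nums.length > 1 then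
    checkLoopA nums (PySem.List.pyRange 1 nums.length 1)
  else
    if PySem.Int.mod (PySem.List.pyGetD nums 0 0) 2 ≠ 0 then true else false

-- ===== PORT B =====
-- Source B's inner 'rec(lo, hi)': split [lo,hi) at mid = (lo+hi)//2, recurse on both halves,
-- compare the junction pair.  Indices are nonnegative throughout, so Nat is exact here
-- (Python '//2' on nonnegative ints = Nat '/2'); nums[lo] is in range whenever rec reads it,
-- so List.getD is exact.
def recB (nums : List Int) (lo hi : Nat) : Bool :=
  if hi - lo ≤ 1 then
    hi == lo || decide (PySem.Int.mod (nums.getD lo 0) 2 ≠ 0)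
  else
    let mid := (lo + hi) / 2
    recB nums lo mid && (recB nums mid hi && decide (nums.getD (mid - 1) 0 < nums.getD mid 0))
termination_by hi - lo
decreasing_by all_goals omega

def check_odd_inc_alt (nums : List Int) : Bool := recB nums 0 nums.length

-- ===== PRECONDITION & SPEC =====
-- A raises IndexError on the empty list (nums[0] in the else branch); Pre_ excludes exactly [].
def Pre_check_odd_inc (nums : List Int) : Prop := nums ≠ []
instance (nums : List Int) : Decidable (Pre_check_odd_inc nums) := by unfold Pre_check_odd_inc; infer_instance
def pvWitness_check_odd_inc : List Int := ([1, 3, 5])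

def Spec_check_odd_inc (nums : List Int) (out : Bool) : Prop := out = check_odd_inc_alt nums
instance (nums : List Int) (out : Bool) : Decidable (Spec_check_odd_inc nums out) := by unfold Spec_check_odd_inc; infer_instance

-- ===== CLAIM (what is proved, stated in full; the proofs are below) =====
def Claim_equal_check_odd_inc : Prop := ∀ (nums : List Int), Dom_check_odd_inc nums → Pre_check_odd_inc nums → Spec_check_odd_inc nums (check_odd_inc nums)

-- ===== LEMMAS AND PROOFS =====

-- proof-only helper: the per-adjacent-pair condition A's loop checks, phrased on the list itself
def pairCheck : List Int → Bool
  | a :: b :: rest =>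
    (decide (b > a) && decide (PySem.Int.mod b 2 ≠ 0) && decide (PySem.Int.mod a 2 ≠ 0)) &&
      pairCheck (b :: rest)
  | _ => true

-- proof-only intermediate: two whole-list passes (all-odd; adjacent strictly increasing)
def twoPass (nums : List Int) : Bool :=
  nums.all (fun x => decide (PySem.Int.mod x 2 ≠ 0)) &&
    (nums.zip nums.tail).all (fun p => decide (p.1 < p.2))

-- the common semantic content of both programs on an index segment [lo, hi)
def Good (nums : List Int) (lo hi : Nat) : Prop :=
  (∀ i, i < hi → lo ≤ i → PySem.Int.mod (nums.getD i 0) 2 ≠ 0) ∧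
  (∀ i, i < hi → lo < i → nums.getD (i - 1) 0 < nums.getD i 0)

theorem checkLoopA_eq_pairCheck (nums : List Int) :
    ∀ (n k : Nat), n = nums.length - k → 1 ≤ k →
      checkLoopA nums (PySem.List.pyRange k nums.length 1) = pairCheck (nums.drop (k - 1)) := by
  intro n
  induction n with
  | zero =>
    intro k hn hk
    have hle : nums.length ≤ k := by omega
    rw [PySem.List.pyRange_one_eq_nil (by exact_mod_cast hle)]
    have : pairCheck (nums.drop (k - 1)) = true := by
      have hlen : (nums.drop (k - 1)).length ≤ 1 := by
        simp [List.length_drop]; omega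
      match h : nums.drop (k - 1) with
      | [] => simp [pairCheck]
      | [a] => simp [pairCheck]
      | a :: b :: rest => rw [h] at hlen; simp at hlen
    simp [checkLoopA, this]
  | succ m ih =>
    intro k hn hk
    have hlt : k < nums.length := by omega
    rw [PySem.List.pyRange_one_cons (by exact_mod_cast hlt)]
    have hget : PySem.List.pyGetD nums (k : Int) 0 = nums[k] := by
      simp [List.getD_eq_getElem?_getD, List.getElem?_eq_getElem hlt]
    have hk1 : ((k : Int) - 1) = ((k - 1 : Nat) : Int) := by omega
    have hget' : PySem.List.pyGetD nums ((k : Int) - 1) 0 = nums[k - 1] := by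
      rw [hk1]
      have hlt' : k - 1 < nums.length := by omega
      simp [List.getD_eq_getElem?_getD, List.getElem?_eq_getElem hlt']
    have hdrop1 : nums.drop (k - 1) = nums[k - 1] :: nums.drop k := by
      have h0 := List.drop_eq_getElem_cons (l := nums) (i := k - 1) (by omega)
      have hkk : k - 1 + 1 = k := by omega
      rwa [hkk] at h0
    have hdrop2 : nums.drop k = nums[k] :: nums.drop (k + 1) :=
      List.drop_eq_getElem_cons hlt
    have hih : checkLoopA nums (PySem.List.pyRange (↑(k + 1)) (↑nums.length) 1) =
        pairCheck (nums.drop ((k + 1) - 1)) := ih (k + 1) (by omega) (by omega)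
    have hcast : ((k : Int) + 1) = ((k + 1 : Nat) : Int) := by omega
    have hthis : nums.drop ((k + 1) - 1) = nums[k] :: nums.drop (k + 1) := by
      simp only [Nat.add_sub_cancel]; exact hdrop2
    rw [hthis] at hih
    rw [hdrop1, hdrop2, pairCheck]
    simp only [checkLoopA, hget, hget']
    rw [hcast, hih]
    by_cases h1 : nums[k] > nums[k - 1] <;>
      by_cases h2 : PySem.Int.mod nums[k] 2 ≠ 0 <;>
        by_cases h3 : PySem.Int.mod nums[k - 1] 2 ≠ 0 <;>
          simp [h1]

theorem odd_head_pairCheck (ys : List Int) : ∀ (a : Int),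
    (decide (PySem.Int.mod a 2 ≠ 0) && pairCheck (a :: ys)) = twoPass (a :: ys) := by
  induction ys with
  | nil => intro a; simp [pairCheck, twoPass]
  | cons b rest ih =>
    intro a
    have h := ih b
    simp only [twoPass, pairCheck, List.all_cons, List.tail_cons, List.zip_cons_cons] at h ⊢
    rw [Bool.eq_iff_iff] at h ⊢
    simp only [Bool.and_eq_true, decide_eq_true_eq] at h ⊢
    tauto

theorem pairCheck_absorb_head (a b : Int) (rest : List Int) :
    pairCheck (a :: b :: rest) = (decide (PySem.Int.mod a 2 ≠ 0) && pairCheck (a :: b :: rest)) := by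
  rw [pairCheck]
  by_cases h : PySem.Int.mod a 2 ≠ 0 <;> simp [PySem.Int.mod] at * <;> omega

theorem A_eq_twoPass (nums : List Int) (hpre : nums ≠ []) :
    check_odd_inc nums = twoPass nums := by
  match nums with
  | [] => exact absurd rfl hpre
  | [a] =>
    simp only [check_odd_inc, twoPass]
    by_cases h : PySem.Int.mod a 2 ≠ 0 <;> simp [PySem.List.pyGetD_zero_cons]
  | a :: b :: rest =>
    have hlen : (a :: b :: rest).length > 1 := by simp
    have hloop := checkLoopA_eq_pairCheck (a :: b :: rest) ((a :: b :: rest).length - 1) 1 rfl le_rfl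
    simp only [Nat.cast_one, Nat.sub_self, List.drop_zero] at hloop
    simp only [check_odd_inc, if_pos hlen]
    rw [hloop, pairCheck_absorb_head, odd_head_pairCheck]

theorem recB_iff (nums : List Int) :
    ∀ (n lo hi : Nat), hi - lo ≤ n → lo ≤ hi →
      (recB nums lo hi = true ↔ Good nums lo hi) := by
  intro n
  induction n with
  | zero =>
    intro lo hi h1 h2
    have : hi = lo := by omega
    subst this
    unfold Good
    exact ⟨fun _ => ⟨fun i h h' => absurd h (by omega), fun i h h' => absurd h (by omega)⟩,
      fun _ => by rw [recB]; simp⟩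
  | succ m ih =>
    intro lo hi h1 h2
    by_cases hbase : hi - lo ≤ 1
    · rw [recB, if_pos hbase]
      rcases Nat.lt_or_ge lo hi with hlt | hge
      · have : hi = lo + 1 := by omega
        subst this
        simp [Good]
        constructor
        · intro ho
          refine ⟨?_, ?_⟩
          · intro i hi1 hi2
            have : i = lo := by omega
            subst this; exact ho
          · intro i hi1 hi2; omega
        · intro ⟨ho, _⟩; exact ho lo (by omega) le_rfl
      · have : hi = lo := by omega
        subst this
        unfold Good
        exact ⟨fun _ => ⟨fun i h h' => absurd h (by omega), fun i h h' => absurd h (by omega)⟩,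
          fun _ => by simp⟩
    · have hge2 : lo + 2 ≤ hi := by omega
      rw [recB, if_neg hbase]
      have hm1 : lo < (lo + hi) / 2 := by omega
      have hm2 : (lo + hi) / 2 < hi := by omega
      have ih1 := ih lo ((lo + hi) / 2) (by omega) (by omega)
      have ih2 := ih ((lo + hi) / 2) hi (by omega) (by omega)
      simp only [Bool.and_eq_true, decide_eq_true_eq, ih1, ih2]
      constructor
      · intro ⟨⟨g1o, g1i⟩, ⟨g2o, g2i⟩, gj⟩
        constructor
        · intro i hih hil
          by_cases hc : i < (lo + hi) / 2
          · exact g1o i hc hil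
          · exact g2o i hih (by omega)
        · intro i hih hil
          by_cases hc : i < (lo + hi) / 2
          · exact g1i i hc hil
          · by_cases hc2 : i = (lo + hi) / 2
            · subst hc2; exact gj
            · exact g2i i hih (by omega)
      · intro ⟨go, gi⟩
        refine ⟨⟨?_, ?_⟩, ⟨?_, ?_⟩, ?_⟩
        · intro i hih hil; exact go i (by omega) hil
        · intro i hih hil; exact gi i (by omega) hil
        · intro i hih hil; exact go i hih (by omega)
        · intro i hih hil; exact gi i hih (by omega)
        · exact gi ((lo + hi) / 2) hm2 hm1

theorem twoPass_iff (nums : List Int) :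
    twoPass nums = true ↔ Good nums 0 nums.length := by
  unfold twoPass Good
  simp only [Bool.and_eq_true, List.all_eq_true, decide_eq_true_eq]
  constructor
  · intro ⟨ho, hi⟩
    constructor
    · intro i h _
      rw [List.getD_eq_getElem _ _ h]
      exact ho _ (List.getElem_mem h)
    · intro i h h0
      have hz : i - 1 < (nums.zip nums.tail).length := by
        simp [List.length_zip, List.length_tail]; omega
      have := hi _ (List.getElem_mem hz)
      rw [List.getElem_zip, List.getElem_tail] at this
      have hi1 : i - 1 + 1 = i := by omega
      rw [List.getD_eq_getElem _ _ (by omega : i - 1 < nums.length),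
          List.getD_eq_getElem _ _ h]
      simp only [hi1] at this
      exact this
  · intro ⟨go, gi⟩
    constructor
    · intro x hx
      obtain ⟨i, h, rfl⟩ := List.mem_iff_getElem.mp hx
      have := go i h (Nat.zero_le _)
      rwa [List.getD_eq_getElem _ _ h] at this
    · intro p hp
      obtain ⟨i, h, rfl⟩ := List.mem_iff_getElem.mp hp
      have hz : i + 1 < nums.length := by
        simp [List.length_zip, List.length_tail] at h; omega
      have := gi (i + 1) hz (by omega)
      rw [List.getD_eq_getElem _ _ (by omega : i + 1 - 1 < nums.length),
          List.getD_eq_getElem _ _ hz] at this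
      rw [List.getElem_zip, List.getElem_tail]
      simpa using this

-- ===== VERDICT (by name: the statement is the Claim_ definition above) =====
theorem check_odd_inc_spec : Claim_equal_check_odd_inc := by
  intro nums _ hpre
  unfold Spec_check_odd_inc check_odd_inc_alt
  rw [A_eq_twoPass nums hpre, Bool.eq_iff_iff, twoPass_iff]
  exact (recB_iff nums nums.length 0 nums.length (by omega) (by omega)).symm
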